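-- pv_equiv track=rewrite | github.com/Colorado-Mesa-University-Cybersecurity/BinaryImageTransformation | experiments/helper_functions.py | compare_3d_lists
-- ===== SOURCE A (Python) =====
-- from typing import List
--
-- def compare_3d_lists(list1: List[List[List]], list2: List[List[List]]) -> bool:
--     """
--     Compare two 3D lists and return True if they have the same shape and elements, and False otherwise.
--
--     Args:
--         list1: The first 3D list to compare.
--         list2: The second 3D list to compare.
--
--     Returns:
--         A boolean indicating whether the two lists are equivalent or not.
--     """
--     if len(list1) != len(list2):
--         return False
--     for i in range(len(list1)):
--         if len(list1[i]) != len(list2[i]):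
--             return False
--         for j in range(len(list1[i])):
--             if len(list1[i][j]) != len(list2[i][j]):
--                 return False
--             for k in range(len(list1[i][j])):
--                 if list1[i][j][k] != list2[i][j][k]:
--                     return False
--     return True
-- ===== SOURCE B (Python) =====
-- from typing import List
--
-- def compare_3d_lists(list1: List[List[List]], list2: List[List[List]]) -> bool:
--     # Stage 1: compare shape signatures (nested lists of row lengths); this also
--     # covers the outer and middle length checks of the original.
--     if [[len(row) for row in plane] for plane in list1] != \
--        [[len(row) for row in plane] for plane in list2]:
--         return False
--     # Stage 2: shapes match, so flatten both tensors and compare elements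
--     # pairwise with `!=` (same leaf comparison as the original).
--     flat1 = [x for plane in list1 for row in plane for x in row]
--     flat2 = [x for plane in list2 for row in plane for x in row]
--     return not any(x != y for x, y in zip(flat1, flat2))
-- ===== Notes on version B (the rewrite author's own statement) =====
-- stated objective: alternative
-- what changed: Instead of three interleaved index loops with per-level length checks, B compares the two tensors in two staged passes: first it builds and compares whole shape signatures (nested lists of lengths), then it flattens both tensors and compares the zipped element streams.
import Mathlib
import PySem

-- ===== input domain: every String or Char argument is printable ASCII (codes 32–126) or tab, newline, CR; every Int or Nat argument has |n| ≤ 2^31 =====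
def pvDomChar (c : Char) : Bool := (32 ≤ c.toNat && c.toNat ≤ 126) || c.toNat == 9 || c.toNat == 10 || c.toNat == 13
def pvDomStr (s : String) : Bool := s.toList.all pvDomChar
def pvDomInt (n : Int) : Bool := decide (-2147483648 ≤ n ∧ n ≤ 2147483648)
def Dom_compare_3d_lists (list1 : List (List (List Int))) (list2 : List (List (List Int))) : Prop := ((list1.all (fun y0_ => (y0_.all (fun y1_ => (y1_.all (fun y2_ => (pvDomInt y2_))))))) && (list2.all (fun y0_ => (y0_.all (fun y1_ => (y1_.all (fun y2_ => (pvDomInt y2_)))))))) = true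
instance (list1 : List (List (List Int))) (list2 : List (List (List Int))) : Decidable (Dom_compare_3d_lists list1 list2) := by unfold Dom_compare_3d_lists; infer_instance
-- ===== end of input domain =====

-- B compares shape signatures first, then the flattened element streams (objective: alternative decomposition).
-- ===== PORT A =====
def aLoopK (x y : List Int) (k : Nat) : Bool :=
  if _h : k < x.length then
    if x.getD k 0 ≠ y.getD k 0 then false
    else aLoopK x y (k + 1)
  else true
termination_by x.length - k
decreasing_by omega

def aLoopJ (a b : List (List Int)) (j : Nat) : Bool :=
  if _h : j < a.length then
    if (a.getD j []).length ≠ (b.getD j []).length then false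
    else if aLoopK (a.getD j []) (b.getD j []) 0 = false then false
    else aLoopJ a b (j + 1)
  else true
termination_by a.length - j
decreasing_by omega

def aLoopI (l1 l2 : List (List (List Int))) (i : Nat) : Bool :=
  if _h : i < l1.length then
    if (l1.getD i []).length ≠ (l2.getD i []).length then false
    else if aLoopJ (l1.getD i []) (l2.getD i []) 0 = false then false
    else aLoopI l1 l2 (i + 1)
  else true
termination_by l1.length - i
decreasing_by omega

def compare_3d_lists (list1 : List (List (List Int))) (list2 : List (List (List Int))) : Bool :=
  if list1.length ≠ list2.length then false
  else aLoopI list1 list2 0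

-- ===== PORT B =====
-- [[len(row) for row in plane] for plane in l]
def bShape (l : List (List (List Int))) : List (List Nat) :=
  l.map (fun plane => plane.map (fun row => row.length))

-- [x for plane in l for row in plane for x in row]
def bFlat (l : List (List (List Int))) : List Int :=
  l.flatMap (fun plane => plane.flatMap (fun row => row))

def compare_3d_lists_alt (list1 : List (List (List Int))) (list2 : List (List (List Int))) : Bool :=
  if bShape list1 ≠ bShape list2 then false
  else ! ((bFlat list1).zip (bFlat list2)).any (fun xy => xy.1 ≠ xy.2)

-- ===== PRECONDITION & SPEC =====
def Spec_compare_3d_lists (list1 : List (List (List Int))) (list2 : List (List (List Int))) (out : Bool) : Prop := out = compare_3d_lists_alt list1 list2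
instance (list1 : List (List (List Int))) (list2 : List (List (List Int))) (out : Bool) : Decidable (Spec_compare_3d_lists list1 list2 out) := by unfold Spec_compare_3d_lists; infer_instance

-- ===== CLAIM (what is proved, stated in full; the proofs are below) =====
def Claim_equal_compare_3d_lists : Prop := ∀ (list1 : List (List (List Int))) (list2 : List (List (List Int))), Dom_compare_3d_lists list1 list2 → Spec_compare_3d_lists list1 list2 (compare_3d_lists list1 list2)

-- ===== LEMMAS AND PROOFS =====
lemma aK_iff (x y : List Int) (hlen : x.length = y.length) :
    ∀ n k, x.length - k = n → (aLoopK x y k = true ↔ x.drop k = y.drop k) := by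
  intro n
  induction n with
  | zero =>
    intro k hk
    have hx : ¬ k < x.length := by omega
    rw [aLoopK]
    simp [hx, List.drop_eq_nil_of_le (show x.length ≤ k by omega),
      List.drop_eq_nil_of_le (show y.length ≤ k by omega)]
  | succ n ih =>
    intro k hk
    have hx : k < x.length := by omega
    have hy : k < y.length := by omega
    rw [aLoopK, List.drop_eq_getElem_cons hx, List.drop_eq_getElem_cons hy]
    simp only [hx, dif_pos, List.getD_eq_getElem _ _ hx, List.getD_eq_getElem _ _ hy]
    by_cases h : x[k] = y[k]
    · rw [if_neg (by simp [h]), ih (k + 1) (by omega)]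
      simp only [List.cons.injEq, h, true_and]
    · rw [if_pos h]
      simp only [Bool.false_eq_true, false_iff, List.cons.injEq, not_and]
      intro e _
      exact h e

lemma aJ_iff (a b : List (List Int)) (hlen : a.length = b.length) :
    ∀ n j, a.length - j = n → (aLoopJ a b j = true ↔ a.drop j = b.drop j) := by
  intro n
  induction n with
  | zero =>
    intro j hj
    have hx : ¬ j < a.length := by omega
    rw [aLoopJ]
    simp [hx, List.drop_eq_nil_of_le (show a.length ≤ j by omega),
      List.drop_eq_nil_of_le (show b.length ≤ j by omega)]
  | succ n ih =>
    intro j hj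
    have hx : j < a.length := by omega
    have hy : j < b.length := by omega
    rw [aLoopJ, List.drop_eq_getElem_cons hx, List.drop_eq_getElem_cons hy]
    simp only [hx, dif_pos, List.getD_eq_getElem _ _ hx, List.getD_eq_getElem _ _ hy]
    by_cases h : a[j].length = b[j].length
    · have hK := aK_iff a[j] b[j] h (a[j].length - 0) 0 rfl
      simp only [List.drop_zero] at hK
      rw [if_neg (by simp [h])]
      by_cases he : a[j] = b[j]
      · rw [if_neg (by simp [hK.mpr he]), ih (j + 1) (by omega)]
        simp only [List.cons.injEq, he, true_and]
      · have hF : aLoopK a[j] b[j] 0 = false := by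
          cases hc : aLoopK a[j] b[j] 0
          · rfl
          · exact absurd (hK.mp hc) he
        rw [if_pos hF]
        simp only [Bool.false_eq_true, false_iff, List.cons.injEq, not_and]
        intro e _
        exact he e
    · rw [if_pos h]
      simp only [Bool.false_eq_true, false_iff, List.cons.injEq, not_and]
      intro e _
      exact h (by rw [e])

lemma aI_iff (l1 l2 : List (List (List Int))) (hlen : l1.length = l2.length) :
    ∀ n i, l1.length - i = n → (aLoopI l1 l2 i = true ↔ l1.drop i = l2.drop i) := by
  intro n
  induction n with
  | zero =>
    intro i hi
    have hx : ¬ i < l1.length := by omega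
    rw [aLoopI]
    simp [hx, List.drop_eq_nil_of_le (show l1.length ≤ i by omega),
      List.drop_eq_nil_of_le (show l2.length ≤ i by omega)]
  | succ n ih =>
    intro i hi
    have hx : i < l1.length := by omega
    have hy : i < l2.length := by omega
    rw [aLoopI, List.drop_eq_getElem_cons hx, List.drop_eq_getElem_cons hy]
    simp only [hx, dif_pos, List.getD_eq_getElem _ _ hx, List.getD_eq_getElem _ _ hy]
    by_cases h : l1[i].length = l2[i].length
    · have hJ := aJ_iff l1[i] l2[i] h (l1[i].length - 0) 0 rfl
      simp only [List.drop_zero] at hJ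
      rw [if_neg (by simp [h])]
      by_cases he : l1[i] = l2[i]
      · rw [if_neg (by simp [hJ.mpr he]), ih (i + 1) (by omega)]
        simp only [List.cons.injEq, he, true_and]
      · have hF : aLoopJ l1[i] l2[i] 0 = false := by
          cases hc : aLoopJ l1[i] l2[i] 0
          · rfl
          · exact absurd (hJ.mp hc) he
        rw [if_pos hF]
        simp only [Bool.false_eq_true, false_iff, List.cons.injEq, not_and]
        intro e _
        exact he e
    · rw [if_pos h]
      simp only [Bool.false_eq_true, false_iff, List.cons.injEq, not_and]
      intro e _
      exact h (by rw [e])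

lemma A_true (l1 l2 : List (List (List Int))) :
    compare_3d_lists l1 l2 = true ↔ l1 = l2 := by
  unfold compare_3d_lists
  by_cases h : l1.length = l2.length
  · have := aI_iff l1 l2 h (l1.length - 0) 0 rfl
    simp only [List.drop_zero] at this
    simp [h, this]
  · have : l1 ≠ l2 := fun e => h (by rw [e])
    simp [h, this]

lemma zip_any_false (x y : List Int) (hlen : x.length = y.length) :
    ((x.zip y).any (fun xy => xy.1 ≠ xy.2) = false) ↔ x = y := by
  induction x generalizing y with
  | nil =>
    cases y with
    | nil => simp
    | cons b bs => simp at hlen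
  | cons a as ih =>
    cases y with
    | nil => simp at hlen
    | cons b bs =>
      simp only [List.length_cons, Nat.add_right_cancel_iff] at hlen
      rw [List.zip_cons_cons, List.any_cons, Bool.or_eq_false_iff]
      constructor
      · rintro ⟨h1, h2⟩
        have ha : a = b := by simpa using h1
        rw [ha, (ih bs hlen).mp h2]
      · intro he
        injection he with e1 e2
        exact ⟨by simp [e1], (ih bs hlen).mpr e2⟩

lemma flat2_iff (p q : List (List Int))
    (h : p.map (fun r => r.length) = q.map (fun r => r.length)) :
    (p.flatMap (fun r => r) = q.flatMap (fun r => r)) ↔ p = q := by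
  induction p generalizing q with
  | nil =>
    cases q with
    | nil => simp
    | cons b bs => simp at h
  | cons a as ih =>
    cases q with
    | nil => simp at h
    | cons b bs =>
      simp only [List.map_cons, List.cons.injEq] at h
      obtain ⟨h1, h2⟩ := h
      simp only [List.flatMap_cons, List.cons.injEq]
      constructor
      · intro he
        obtain ⟨e1, e2⟩ := List.append_inj he h1
        exact ⟨e1, (ih bs h2).mp e2⟩
      · rintro ⟨e1, e2⟩
        rw [e1, e2]

lemma flat2_len (p q : List (List Int))
    (h : p.map (fun r => r.length) = q.map (fun r => r.length)) :
    (p.flatMap (fun r => r)).length = (q.flatMap (fun r => r)).length := by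
  simp only [List.length_flatMap]
  rw [h]

lemma flat3_iff (l1 l2 : List (List (List Int))) (h : bShape l1 = bShape l2) :
    (bFlat l1 = bFlat l2) ↔ l1 = l2 := by
  induction l1 generalizing l2 with
  | nil =>
    cases l2 with
    | nil => simp
    | cons b bs => simp [bShape] at h
  | cons a as ih =>
    cases l2 with
    | nil => simp [bShape] at h
    | cons b bs =>
      simp only [bShape, List.map_cons, List.cons.injEq] at h
      obtain ⟨h1, h2⟩ := h
      simp only [bFlat, List.flatMap_cons, List.cons.injEq]
      constructor
      · intro he
        obtain ⟨e1, e2⟩ := List.append_inj he (flat2_len a b h1)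
        exact ⟨(flat2_iff a b h1).mp e1, (ih bs h2).mp e2⟩
      · rintro ⟨e1, e2⟩
        rw [e1, e2]

lemma flat3_len (l1 l2 : List (List (List Int))) (h : bShape l1 = bShape l2) :
    (bFlat l1).length = (bFlat l2).length := by
  have hc := congrArg (fun s : List (List Nat) => (s.map (fun r => r.sum)).sum) h
  simpa [bShape, bFlat, List.length_flatMap, List.map_map, Function.comp] using hc

lemma B_true (l1 l2 : List (List (List Int))) :
    compare_3d_lists_alt l1 l2 = true ↔ l1 = l2 := by
  unfold compare_3d_lists_alt
  by_cases h : bShape l1 = bShape l2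
  · simp only [h, ne_eq, not_true_eq_false, if_false, Bool.not_eq_true',
      zip_any_false (bFlat l1) (bFlat l2) (flat3_len l1 l2 h), flat3_iff l1 l2 h]
  · have : l1 ≠ l2 := fun e => h (by rw [e])
    simp [h, this]

-- ===== VERDICT (by name: the statement is the Claim_ definition above) =====
theorem compare_3d_lists_spec : Claim_equal_compare_3d_lists := by
  intro l1 l2 _
  unfold Spec_compare_3d_lists
  by_cases h : l1 = l2
  · rw [(A_true l1 l2).mpr h, (B_true l1 l2).mpr h]
  · have hA : compare_3d_lists l1 l2 = false := by
      cases hc : compare_3d_lists l1 l2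
      · rfl
      · exact absurd ((A_true l1 l2).mp hc) h
    have hB : compare_3d_lists_alt l1 l2 = false := by
      cases hc : compare_3d_lists_alt l1 l2
      · rfl
      · exact absurd ((B_true l1 l2).mp hc) h
    rw [hA, hB]
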